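-- pv_equiv track=rewrite | github.com/ZamAI-ORG/zamai-models | update_all_spaces.py | add_zerogpu_support
-- ===== SOURCE A (Python) =====
-- def add_zerogpu_support(content, has_spaces_import, has_gpu_decorator):
--     """Add ZeroGPU support to app.py content"""
--     lines = content.split('\n')
--     result = []
--
--     # Add spaces import if missing
--     if not has_spaces_import:
--         # Find the best place to add import (after other imports)
--         import_added = False
--         for i, line in enumerate(lines):
--             result.append(line)
--
--             # After import statements, add spaces
--             if not import_added and line.strip().startswith(('import ', 'from ')):
--                 # Look ahead to see if next line is also an import
--                 if i + 1 >= len(lines) or not lines[i + 1].strip().startswith(('import ', 'from ')):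
--                     result.append('import spaces')
--                     import_added = True
--
--         if not import_added:
--             # Add at the top if no imports found
--             result.insert(0, 'import spaces')
--             result.insert(1, '')
--
--         lines = result
--         result = []
--
--     # Add @spaces.GPU decorator if missing
--     if not has_gpu_decorator:
--         for i, line in enumerate(lines):
--             # Look for function definitions that should use GPU
--             if line.strip().startswith('def ') and any(keyword in line.lower() for keyword in
--                 ['predict', 'generate', 'inference', 'process', 'transcribe', 'translate']):
--                 result.append('@spaces.GPU')
--             result.append(line)
--     else:
--         result = lines
--
--     return '\n'.join(result)
-- ===== SOURCE B (Python) =====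
-- _KEYWORDS = ['predict', 'generate', 'inference', 'process', 'transcribe', 'translate']
--
--
-- def _is_import(line):
--     s = line.strip()
--     return s.startswith('import ') or s.startswith('from ')
--
--
-- def _needs_gpu(line):
--     low = line.lower()
--     return line.strip().startswith('def ') and any(k in low for k in _KEYWORDS)
--
--
-- def add_zerogpu_support(content, has_spaces_import, has_gpu_decorator):
--     """Add ZeroGPU support to app.py content (single fused pass)."""
--     lines = content.split('\n')
--     n = len(lines)
--     if has_spaces_import:
--         ins = None
--     else:
--         # end of the first run of import lines, or -1 if there are none
--         ins = next((i for i in range(n)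
--                     if _is_import(lines[i])
--                     and (i + 1 >= n or not _is_import(lines[i + 1]))), -1)
--     out = ['import spaces', ''] if ins == -1 else []
--     for i, line in enumerate(lines):
--         if not has_gpu_decorator and _needs_gpu(line):
--             out.append('@spaces.GPU')
--         out.append(line)
--         if i == ins:
--             out.append('import spaces')
--     return '\n'.join(out)
-- ===== Notes on version B (the rewrite author's own statement) =====
-- stated objective: alternative
-- what changed: A rewrites the line list twice (an import-insertion pass that builds a new list, then a decorator pass over that list); B first computes the insertion index with a read-only scan and then builds the output in one fused forward pass that splices the import and the decorators together.
import Mathlib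
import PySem

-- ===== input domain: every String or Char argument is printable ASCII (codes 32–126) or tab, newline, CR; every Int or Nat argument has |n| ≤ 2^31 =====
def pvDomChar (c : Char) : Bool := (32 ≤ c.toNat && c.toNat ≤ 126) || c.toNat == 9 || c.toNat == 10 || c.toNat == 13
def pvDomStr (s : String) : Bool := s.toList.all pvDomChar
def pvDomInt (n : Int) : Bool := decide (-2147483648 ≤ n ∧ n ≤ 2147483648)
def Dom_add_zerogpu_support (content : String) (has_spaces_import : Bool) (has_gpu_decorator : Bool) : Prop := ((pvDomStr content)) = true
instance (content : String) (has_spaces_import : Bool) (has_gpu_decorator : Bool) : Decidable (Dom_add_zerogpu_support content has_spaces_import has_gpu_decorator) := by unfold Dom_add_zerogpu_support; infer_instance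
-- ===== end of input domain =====

-- B replaces A's two successive list-rewriting passes by a read-only scan for the
-- insertion index followed by one fused output-building pass (objective: alternative).


-- shared helpers: content.split('\n') (sep is nonempty, so split? always returns),
-- and the line predicates both Pythons test with identical code
def pvSplitLines (s : String) : List String := (PySem.Str.split? s "\n").getD []

def pvIsImport (l : String) : Bool :=
  PySem.Str.startswith (PySem.Str.strip l) "import " || PySem.Str.startswith (PySem.Str.strip l) "from "

-- the look-ahead "i + 1 >= len(lines) or not lines[i+1] is an import", on the tail
def pvBoundary : List String → Bool
  | [] => true
  | r :: _ => !pvIsImport r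

def pvNeedsGpu (l : String) : Bool :=
  PySem.Str.startswith (PySem.Str.strip l) "def " &&
    (["predict", "generate", "inference", "process", "transcribe", "translate"].any
      (fun k => PySem.Str.isIn k (PySem.Str.lower l)))

-- ===== PORT A =====
-- A's first loop: copy lines, inserting "import spaces" after the first import
-- line whose successor is not an import; returns (result, import_added).
def pvAddImport : List String → Bool → (List String × Bool)
  | [], added => ([], added)
  | l :: rest, added =>
    if !added && pvIsImport l && pvBoundary rest then
      let p := pvAddImport rest true
      (l :: "import spaces" :: p.1, p.2)
    else
      let p := pvAddImport rest added
      (l :: p.1, p.2)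

-- A's second loop: prepend "@spaces.GPU" before matching def lines.
def pvDecorate : List String → List String
  | [] => []
  | l :: rest => (if pvNeedsGpu l then ["@spaces.GPU", l] else [l]) ++ pvDecorate rest

def add_zerogpu_support (content : String) (has_spaces_import : Bool) (has_gpu_decorator : Bool) : String :=
  let lines := pvSplitLines content
  let lines1 :=
    if !has_spaces_import then
      let p := pvAddImport lines false
      if p.2 then p.1 else "import spaces" :: "" :: p.1
    else lines
  PySem.Str.join "\n" (if !has_gpu_decorator then pvDecorate lines1 else lines1)

-- ===== PORT B =====
-- B's scan: index of the end of the first import run, -1 if none.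
def pvScan : List String → Int
  | [] => -1
  | l :: rest =>
    if pvIsImport l && pvBoundary rest then 0
    else if pvScan rest == -1 then -1 else 1 + pvScan rest

-- B's fused pass: decorators and the spliced import in one traversal.
def pvEmit : Int → Option Int → Bool → List String → List String
  | _, _, _, [] => []
  | i, ins, dec, l :: rest =>
    (if dec && pvNeedsGpu l then ["@spaces.GPU", l] else [l]) ++
    (if ins == some i then ["import spaces"] else []) ++
    pvEmit (i + 1) ins dec rest

def add_zerogpu_support_alt (content : String) (has_spaces_import : Bool) (has_gpu_decorator : Bool) : String :=
  let lines := pvSplitLines content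
  let ins : Option Int := if has_spaces_import then none else some (pvScan lines)
  let pre := if ins == some (-1) then ["import spaces", ""] else []
  PySem.Str.join "\n" (pre ++ pvEmit 0 ins (!has_gpu_decorator) lines)

-- ===== PRECONDITION & SPEC =====
def Spec_add_zerogpu_support (content : String) (has_spaces_import : Bool) (has_gpu_decorator : Bool) (out : String) : Prop := out = add_zerogpu_support_alt content has_spaces_import has_gpu_decorator
instance (content : String) (has_spaces_import : Bool) (has_gpu_decorator : Bool) (out : String) : Decidable (Spec_add_zerogpu_support content has_spaces_import has_gpu_decorator out) := by unfold Spec_add_zerogpu_support; infer_instance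

-- ===== CLAIM (what is proved, stated in full; the proofs are below) =====
def Claim_equal_add_zerogpu_support : Prop := ∀ (content : String) (has_spaces_import : Bool) (has_gpu_decorator : Bool), Dom_add_zerogpu_support content has_spaces_import has_gpu_decorator → Spec_add_zerogpu_support content has_spaces_import has_gpu_decorator (add_zerogpu_support content has_spaces_import has_gpu_decorator)

-- ===== LEMMAS AND PROOFS =====

-- "decorate iff the flag is set": the shape both final results share
def pvDecIf (d : Bool) (xs : List String) : List String := if d then pvDecorate xs else xs

theorem pvDecIf_nil (d : Bool) : pvDecIf d [] = [] := by cases d <;> simp [pvDecIf, pvDecorate]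

theorem pvDecIf_cons (d : Bool) (l : String) (t : List String) :
    pvDecIf d (l :: t) = (if d && pvNeedsGpu l then ["@spaces.GPU", l] else [l]) ++ pvDecIf d t := by
  cases d <;> simp [pvDecIf, pvDecorate]

theorem pvAddImport_true (xs : List String) : pvAddImport xs true = (xs, true) := by
  induction xs with
  | nil => rfl
  | cons l rest ih => simp [pvAddImport, ih]

theorem pvScan_ge (xs : List String) : -1 ≤ pvScan xs := by
  induction xs with
  | nil => simp [pvScan]
  | cons l rest ih =>
    simp only [pvScan]
    split
    · omega
    · split
      · omega
      · omega

theorem pvEmit_miss (xs : List String) (d : Bool) :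
    ∀ (i : Int) (ins : Option Int), (∀ k, ins = some k → k < i) →
      pvEmit i ins d xs = pvDecIf d xs := by
  induction xs with
  | nil => intro i ins h; simp [pvEmit, pvDecIf_nil]
  | cons l rest ih =>
    intro i ins h
    have hne : (ins == some i) = false := by
      cases ins with
      | none => rfl
      | some k => have := h k rfl; simp; omega
    simp only [pvEmit, hne]
    rw [ih (i + 1) ins (by intro k hk; have := h k hk; omega), pvDecIf_cons]
    simp

theorem pvScan_neg_one (xs : List String) (h : pvScan xs = -1) :
    pvAddImport xs false = (xs, false) := by
  induction xs with
  | nil => rfl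
  | cons l rest ih =>
    by_cases hc : (pvIsImport l && pvBoundary rest) = true
    · simp [pvScan, hc] at h
    · have hr : pvScan rest = -1 := by
        simp only [pvScan, hc, if_false] at h
        by_cases h2 : pvScan rest = -1
        · exact h2
        · simp [h2] at h; have := pvScan_ge rest; omega
      simp [pvAddImport, hc, ih hr]

theorem pvScan_found (xs : List String) (h : pvScan xs ≠ -1) :
    (pvAddImport xs false).2 = true := by
  induction xs with
  | nil => simp [pvScan] at h
  | cons l rest ih =>
    by_cases hc : (pvIsImport l && pvBoundary rest) = true
    · simp [pvAddImport, hc, pvAddImport_true]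
    · have hr : pvScan rest ≠ -1 := by
        intro h2; simp [pvScan, hc, h2] at h
      simp [pvAddImport, hc, ih hr]

theorem pvNeedsGpu_import_spaces : pvNeedsGpu "import spaces" = false := by
  unfold pvNeedsGpu
  rw [show PySem.Str.startswith (PySem.Str.strip "import spaces") "def " = false from by decide]
  simp

theorem pvNeedsGpu_empty : pvNeedsGpu "" = false := by
  unfold pvNeedsGpu
  rw [show PySem.Str.startswith (PySem.Str.strip "") "def " = false from by decide]
  simp

theorem pvAddImport_cons_pos (l : String) (rest : List String)
    (hc : (pvIsImport l && pvBoundary rest) = true) :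
    pvAddImport (l :: rest) false = (l :: "import spaces" :: rest, true) := by
  simp [pvAddImport, hc, pvAddImport_true]

theorem pvAddImport_cons_neg (l : String) (rest : List String)
    (hc : ¬ (pvIsImport l && pvBoundary rest) = true) :
    pvAddImport (l :: rest) false
      = (l :: (pvAddImport rest false).1, (pvAddImport rest false).2) := by
  simp [pvAddImport, hc]

theorem pvEmit_main (xs : List String) (d : Bool) :
    ∀ i : Int, pvEmit i (some (i + pvScan xs)) d xs = pvDecIf d (pvAddImport xs false).1 := by
  induction xs with
  | nil => intro i; simp [pvEmit, pvAddImport, pvDecIf_nil]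
  | cons l rest ih =>
    intro i
    by_cases hc : (pvIsImport l && pvBoundary rest) = true
    · -- insertion point is here
      have hs : pvScan (l :: rest) = 0 := by simp [pvScan, hc]
      rw [hs, pvAddImport_cons_pos l rest hc]
      simp only [pvEmit, add_zero, beq_self_eq_true, if_true]
      rw [pvEmit_miss rest d (i + 1) (some i) (by intro k hk; rw [Option.some.injEq] at hk; omega)]
      rw [pvDecIf_cons, pvDecIf_cons, pvNeedsGpu_import_spaces]
      simp
    · have hs : pvScan (l :: rest) =
          (if pvScan rest == -1 then -1 else 1 + pvScan rest) := by
        simp [pvScan, hc]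
      rw [hs, pvAddImport_cons_neg l rest hc]
      by_cases h2 : pvScan rest = -1
      · rw [if_pos (by simp [h2])]
        have hne : ((some (i + -1) : Option Int) == some i) = false := by simp
        simp only [pvEmit, hne]
        rw [pvEmit_miss rest d (i + 1) (some (i + -1)) (by intro k hk; rw [Option.some.injEq] at hk; omega)]
        rw [pvScan_neg_one rest h2, pvDecIf_cons]
        simp
      · rw [if_neg (by simp [h2])]
        have hge := pvScan_ge rest
        have hne : ((some (i + (1 + pvScan rest)) : Option Int) == some i) = false := by
          simp; omega
        simp only [pvEmit, hne]
        have harr : i + (1 + pvScan rest) = (i + 1) + pvScan rest := by omega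
        rw [harr, ih (i + 1), pvDecIf_cons]
        simp

-- ===== VERDICT (by name: the statement is the Claim_ definition above) =====
theorem add_zerogpu_support_spec : Claim_equal_add_zerogpu_support := by
  intro content hsi hgd _
  unfold Spec_add_zerogpu_support
  simp only [add_zerogpu_support, add_zerogpu_support_alt]
  set lines := pvSplitLines content with hlines
  cases hsi with
  | true =>
    simp only [Bool.not_true, Bool.false_eq_true, if_false, if_true, reduceCtorEq]
    rw [pvEmit_miss lines (!hgd) 0 none (by intro k hk; cases hk)]
    cases hgd <;> simp [pvDecIf]
  | false =>
    simp only [Bool.not_false, Bool.false_eq_true, if_false, if_true]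
    by_cases h2 : pvScan lines = -1
    · rw [pvScan_neg_one lines h2, h2]
      dsimp only
      simp only [Bool.false_eq_true, if_false, beq_self_eq_true, if_true]
      rw [pvEmit_miss lines (!hgd) 0 (some (-1)) (by intro k hk; rw [Option.some.injEq] at hk; omega)]
      cases hgd <;>
        simp [pvDecIf, pvDecorate, pvNeedsGpu_import_spaces, pvNeedsGpu_empty]
    · have hp := pvScan_found lines h2
      have hbe : ((some (pvScan lines) : Option Int) == some (-1)) = false := by simp [h2]
      rw [hp]
      simp only [hbe, Bool.false_eq_true, if_false, if_true, List.nil_append]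
      have hm := pvEmit_main lines (!hgd) 0
      rw [show (0 : Int) + pvScan lines = pvScan lines by omega] at hm
      rw [hm]
      cases hgd <;> simp [pvDecIf]
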